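-- pv_equiv track=rewrite | github.com/glengunawan/Ujian_UraiRajutKata | 1.py | urai
-- ===== SOURCE A (Python) =====
-- def urai(kata):
--     str_tampung = ''
--     b = len(kata)
--     for i in range(b):
--         a=0
--         for a in range(i+1):
--             str_tampung = str_tampung + kata[a]
--     return str_tampung
-- ===== SOURCE B (Python) =====
-- def urai(kata):
--     p = ''
--     parts = []
--     for c in kata:
--         p = p + c
--         parts.append(p)
--     return ''.join(parts)
-- ===== Notes on version B (the rewrite author's own statement) =====
-- stated objective: faster
-- what changed: Maintains one running prefix extended per character in a single pass (joined at the end) instead of A's nested loop recomputing each prefix character-by-character from index 0.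
import Mathlib
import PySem

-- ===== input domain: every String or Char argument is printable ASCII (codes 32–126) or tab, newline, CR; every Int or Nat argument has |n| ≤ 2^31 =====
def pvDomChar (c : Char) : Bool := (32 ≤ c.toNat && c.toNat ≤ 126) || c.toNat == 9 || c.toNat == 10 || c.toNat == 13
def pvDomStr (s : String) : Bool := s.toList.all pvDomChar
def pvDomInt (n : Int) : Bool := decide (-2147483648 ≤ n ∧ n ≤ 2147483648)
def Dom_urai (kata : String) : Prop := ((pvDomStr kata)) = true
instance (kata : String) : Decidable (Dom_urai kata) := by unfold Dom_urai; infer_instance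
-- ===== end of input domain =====

-- B replaces A's nested loop (which rebuilds every prefix from index 0) with a single pass
-- that extends one running prefix and joins the collected prefixes at the end (objective: faster, constant-factor).

-- ===== PORT A =====
-- nested loops over ranges; kata[a] is ported as pyGetD on the char list (the index a ≤ i < len(kata)
-- is always in range, so Python never raises here and the default is never used)
def urai (kata : String) : String :=
  let cs := kata.toList
  let b := PySem.Str.len kata
  String.ofList ((PySem.List.pyRange 0 b 1).foldl (fun str_tampung i =>
    (PySem.List.pyRange 0 (i + 1) 1).foldl
      (fun st a => st ++ [PySem.List.pyGetD cs a ' ']) str_tampung) [])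

-- ===== PORT B =====
-- single pass: running prefix p and list of parts; ''.join of char-list parts is exactly List.flatten
def urai_alt (kata : String) : String :=
  let step := kata.toList.foldl
    (fun (pc : List Char × List (List Char)) c =>
      let p := pc.1 ++ [c]
      (p, pc.2 ++ [p])) ([], [])
  String.ofList step.2.flatten

-- ===== PRECONDITION & SPEC =====
def Spec_urai (kata : String) (out : String) : Prop := out = urai_alt kata
instance (kata : String) (out : String) : Decidable (Spec_urai kata out) := by unfold Spec_urai; infer_instance

-- ===== CLAIM (what is proved, stated in full; the proofs are below) =====
def Claim_equal_urai : Prop := ∀ (kata : String), Dom_urai kata → Spec_urai kata (urai kata)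

-- ===== LEMMAS AND PROOFS =====

lemma urai_innerA (cs : List Char) (m : Nat) (hm : m ≤ cs.length) (st : List Char) :
    (PySem.List.pyRange 0 (m : Int) 1).foldl
      (fun st a => st ++ [PySem.List.pyGetD cs a ' ']) st = st ++ cs.take m := by
  induction m generalizing st with
  | zero => simp
  | succ k ih =>
    have hsplit : PySem.List.pyRange 0 ((k + 1 : Nat) : Int) 1
        = PySem.List.pyRange 0 (k : Int) 1 ++ [(k : Int)] := by
      have := PySem.List.pyRange_one_succ_right (a := 0) (b := (k : Int)) (by positivity)
      push_cast
      simpa using this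
    rw [hsplit, List.foldl_append, ih (by omega)]
    have hk : k < cs.length := by omega
    have hget : PySem.List.pyGetD cs (k : Int) ' ' = cs[k] :=
      PySem.List.pyGetD_ofNat cs k ' ' hk
    simp only [List.foldl_cons, List.foldl_nil, hget]
    rw [List.take_add_one, List.getElem?_eq_getElem hk]
    simp

lemma urai_outerA (cs : List Char) (n : Nat) (hn : n ≤ cs.length) (st : List Char) :
    (PySem.List.pyRange 0 (n : Int) 1).foldl (fun str_tampung i =>
      (PySem.List.pyRange 0 (i + 1) 1).foldl
        (fun st a => st ++ [PySem.List.pyGetD cs a ' ']) str_tampung) st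
    = st ++ ((List.range n).map (fun k => cs.take (k + 1))).flatten := by
  induction n generalizing st with
  | zero => simp
  | succ k ih =>
    have hsplit : PySem.List.pyRange 0 ((k + 1 : Nat) : Int) 1
        = PySem.List.pyRange 0 (k : Int) 1 ++ [(k : Int)] := by
      have := PySem.List.pyRange_one_succ_right (a := 0) (b := (k : Int)) (by positivity)
      push_cast
      simpa using this
    rw [hsplit, List.foldl_append, ih (by omega)]
    have hcast : ((k : Int) + 1) = ((k + 1 : Nat) : Int) := by push_cast; ring
    simp only [List.foldl_cons, List.foldl_nil, hcast]
    rw [urai_innerA cs (k + 1) hn]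
    simp [List.range_succ]

lemma urai_stepB (cs : List Char) (p : List Char) (acc : List (List Char)) :
    cs.foldl (fun (pc : List Char × List (List Char)) c =>
        let q := pc.1 ++ [c]
        (q, pc.2 ++ [q])) (p, acc)
    = (p ++ cs, acc ++ (List.range cs.length).map (fun k => p ++ cs.take (k + 1))) := by
  induction cs generalizing p acc with
  | nil => simp
  | cons c cs ih =>
    simp only [List.foldl_cons]
    rw [ih]
    rw [List.length_cons, List.range_succ_eq_map]
    simp [List.map_map, Function.comp, List.append_assoc]

-- ===== VERDICT (by name: the statement is the Claim_ definition above) =====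
theorem urai_spec : Claim_equal_urai := by
  intro kata _
  unfold Spec_urai urai urai_alt
  simp only [PySem.Str.len_eq]
  rw [urai_outerA kata.toList kata.toList.length le_rfl [],
      urai_stepB kata.toList [] []]
  simp
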